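-- pv_equiv track=rewrite | github.com/rathoddt/Data-Structure-And-Algorithms | p7-significant-binary-bits.py | find_significant_pattern_length
-- ===== SOURCE A (Python) =====
-- def find_significant_pattern_length(n, binary_string):
--     max_len = 0
--     current_char = binary_string[0]
--     current_count = 1
--
--     for i in range(1, n):
--         if binary_string[i] == current_char:
--             current_count += 1
--         else:
--             # Check if the current sequence is NOT at the start or end
--             start = i - current_count
--             end = i - 1
--             if start > 0 and end < n - 1:
--                 max_len = max(max_len, current_count)
--             current_char = binary_string[i]
--             current_count = 1
--
--     # Check the last sequence (at the end of the loop)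
--     start = n - current_count
--     end = n - 1
--     if start > 0 and end < n - 1:
--         max_len = max(max_len, current_count)
--
--     return max_len
-- ===== SOURCE B (Python) =====
-- def find_significant_pattern_length(n, binary_string):
--     # Phase 1: record the positions where the character changes (run boundaries).
--     prev = binary_string[0]
--     boundaries = []
--     for i in range(1, n):
--         c = binary_string[i]
--         if c != prev:
--             boundaries.append(i)
--         prev = c
--     # Phase 2: each interior run is the gap between two consecutive boundaries.
--     best = 0
--     for j in range(1, len(boundaries)):
--         best = max(best, boundaries[j] - boundaries[j - 1])
--     return best
-- ===== Notes on version B (the rewrite author's own statement) =====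
-- stated objective: alternative
-- what changed: A run-length counts with an inline running max and boundary-condition tests; B instead records the positions where the character changes and then takes the maximum gap between consecutive change positions, which is exactly the longest interior run.
import Mathlib
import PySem

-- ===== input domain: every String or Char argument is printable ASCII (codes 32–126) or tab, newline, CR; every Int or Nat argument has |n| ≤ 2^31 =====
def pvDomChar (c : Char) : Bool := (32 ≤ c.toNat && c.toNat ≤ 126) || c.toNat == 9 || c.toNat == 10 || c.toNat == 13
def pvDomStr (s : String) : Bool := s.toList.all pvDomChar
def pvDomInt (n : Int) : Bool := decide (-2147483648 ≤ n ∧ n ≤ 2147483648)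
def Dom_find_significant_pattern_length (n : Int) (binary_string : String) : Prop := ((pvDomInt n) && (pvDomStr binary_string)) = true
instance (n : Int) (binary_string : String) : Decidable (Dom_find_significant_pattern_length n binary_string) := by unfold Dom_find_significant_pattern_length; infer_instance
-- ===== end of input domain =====

-- B replaces A's run-length counting with an inline running max by a different
-- representation: it records the change positions and then takes the maximum gap
-- between consecutive change positions (objective: alternative, same cost).

-- ===== PORT A =====
-- loop body of A's 'for i in range(1, n)' loop; state = (max_len, current_char, current_count)
def pvStepA (l : List Char) (n : Int) (st : Int × Char × Int) (i : Int) : Int × Char × Int :=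
  if PySem.List.pyGetD l i ' ' = st.2.1 then
    (st.1, st.2.1, st.2.2 + 1)
  else
    -- start = i - current_count, end = i - 1
    (if i - st.2.2 > 0 ∧ i - 1 < n - 1 then max st.1 st.2.2 else st.1,
     PySem.List.pyGetD l i ' ', 1)

-- binary_string[i] is ported as pyGetD (in range whenever Pre_ holds, where Python does not raise)
def find_significant_pattern_length (n : Int) (binary_string : String) : Int :=
  let st := (PySem.List.pyRange 1 n 1).foldl (pvStepA binary_string.toList n)
              (0, PySem.List.pyGetD binary_string.toList 0 ' ', 1)
  -- check the last sequence: start = n - current_count, end = n - 1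
  if n - st.2.2 > 0 ∧ n - 1 < n - 1 then max st.1 st.2.2 else st.1

-- ===== PORT B =====
-- loop body of B's first loop; state = (boundaries, prev)
def pvStepB (l : List Char) (st : List Int × Char) (i : Int) : List Int × Char :=
  let c := PySem.List.pyGetD l i ' '
  (if c ≠ st.2 then st.1 ++ [i] else st.1, c)

def find_significant_pattern_length_alt (n : Int) (binary_string : String) : Int :=
  let st := (PySem.List.pyRange 1 n 1).foldl (pvStepB binary_string.toList)
              ([], PySem.List.pyGetD binary_string.toList 0 ' ')
  let boundaries := st.1
  (PySem.List.pyRange 1 (boundaries.length : Int) 1).foldl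
    (fun best j => max best (PySem.List.pyGetD boundaries j 0 - PySem.List.pyGetD boundaries (j - 1) 0)) 0

-- ===== PRECONDITION & SPEC =====
-- Pre_ excludes exactly the inputs where Python A raises IndexError:
-- the empty string (binary_string[0]) and n exceeding the string length.
def Pre_find_significant_pattern_length (n : Int) (binary_string : String) : Prop :=
  binary_string ≠ "" ∧ n ≤ PySem.Str.len binary_string
instance (n : Int) (binary_string : String) : Decidable (Pre_find_significant_pattern_length n binary_string) := by unfold Pre_find_significant_pattern_length; infer_instance

def pvWitness_find_significant_pattern_length : Int × String := (7, "0110010")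

def Spec_find_significant_pattern_length (n : Int) (binary_string : String) (out : Int) : Prop := out = find_significant_pattern_length_alt n binary_string
instance (n : Int) (binary_string : String) (out : Int) : Decidable (Spec_find_significant_pattern_length n binary_string out) := by unfold Spec_find_significant_pattern_length; infer_instance

-- ===== CLAIM (what is proved, stated in full; the proofs are below) =====
def Claim_equal_find_significant_pattern_length : Prop := ∀ (n : Int) (binary_string : String), Dom_find_significant_pattern_length n binary_string → Pre_find_significant_pattern_length n binary_string → Spec_find_significant_pattern_length n binary_string (find_significant_pattern_length n binary_string)

-- ===== LEMMAS AND PROOFS =====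

-- maximum gap between consecutive entries of a list
def pvGmax : List Int → Int
  | [] => 0
  | [_] => 0
  | a :: b :: t => max (pvGmax (b :: t)) (b - a)

lemma pvGmax_append (L : List Int) (hL : L ≠ []) (b : Int) :
    pvGmax (L ++ [b]) = max (pvGmax L) (b - L.getLastD 0) := by
  induction L with
  | nil => simp at hL
  | cons a t ih =>
      cases t with
      | nil => simp [pvGmax]
      | cons x u =>
          have := ih (by simp)
          simp only [List.cons_append] at *
          rw [pvGmax, this, pvGmax]
          simp only [List.getLastD_cons]
          ac_rfl

lemma pv_getD_append (L : List Int) (b j : Int) (h0 : 0 ≤ j) (h1 : j < (L.length : Int)) :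
    PySem.List.pyGetD (L ++ [b]) j 0 = PySem.List.pyGetD L j 0 := by
  rw [PySem.List.pyGetD_eq_getElem _ _ h0 (by simp; omega),
      PySem.List.pyGetD_eq_getElem _ _ h0 h1,
      List.getElem_append_left (by omega)]

lemma pv_getD_concat_self (L : List Int) (b : Int) :
    PySem.List.pyGetD (L ++ [b]) ((L.length : Int)) 0 = b := by
  rw [PySem.List.pyGetD_eq_getElem _ _ (by omega) (by simp)]
  simp

lemma pv_getD_last_nat (L : List Int) (h : L ≠ []) :
    L.getD (L.length - 1) 0 = L.getLastD 0 := by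
  induction L with
  | nil => simp at h
  | cons a t ih =>
      cases t with
      | nil => simp
      | cons x u =>
          have := ih (by simp)
          simpa using this

lemma pv_getD_last (L : List Int) (h : L ≠ []) :
    PySem.List.pyGetD L ((L.length : Int) - 1) 0 = L.getLastD 0 := by
  have hlen : 1 ≤ L.length := List.length_pos_of_ne_nil h
  have ht : ((L.length : Int) - 1).toNat = L.length - 1 := by omega
  rw [PySem.List.pyGetD_of_nonneg _ _ (by omega), ht, pv_getD_last_nat _ h]

-- B's second loop computes pvGmax of the boundary list
lemma pv_loopB (L : List Int) :
    (PySem.List.pyRange 1 (L.length : Int) 1).foldl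
      (fun best j => max best (PySem.List.pyGetD L j 0 - PySem.List.pyGetD L (j - 1) 0)) 0
    = pvGmax L := by
  induction L using List.reverseRecOn with
  | nil => simp [PySem.List.pyRange_one_eq_nil, pvGmax]
  | append_singleton R b ih =>
      cases R with
      | nil =>
          have h1 : PySem.List.pyRange 1 ((([b] : List Int).length : Int)) 1 = [] :=
            PySem.List.pyRange_one_eq_nil (by simp)
          simp [pvGmax]
      | cons r t =>
          have hlen : (((r :: t) ++ [b]).length : Int) = ((r :: t).length : Int) + 1 := by simp
          rw [show (r :: t ++ [b]) = (r :: t) ++ [b] from rfl, hlen,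
              PySem.List.pyRange_one_succ_right (by simp only [List.length_cons]; omega),
              List.foldl_append]
          have hcongr :
              (PySem.List.pyRange 1 ((r :: t).length : Int) 1).foldl
                (fun best j => max best (PySem.List.pyGetD ((r :: t) ++ [b]) j 0 - PySem.List.pyGetD ((r :: t) ++ [b]) (j - 1) 0)) 0
              = (PySem.List.pyRange 1 ((r :: t).length : Int) 1).foldl
                (fun best j => max best (PySem.List.pyGetD (r :: t) j 0 - PySem.List.pyGetD (r :: t) (j - 1) 0)) 0 := by
            apply PySem.List.foldl_congr_mem
            intro acc j hj
            have hj' := (PySem.List.mem_pyRange_one).1 hj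
            rw [pv_getD_append _ _ _ (by omega) (by omega),
                pv_getD_append _ _ _ (by omega) (by omega)]
          rw [hcongr, ih]
          rw [pvGmax_append _ (by simp) b]
          simp only [List.foldl_cons, List.foldl_nil]
          rw [pv_getD_concat_self,
              show ((r :: t).length : Int) - 1 = (((r :: t).length : Int) - 1) from rfl]
          rw [pv_getD_append _ _ _ (by simp only [List.length_cons]; omega) (by simp only [List.length_cons]; omega),
              pv_getD_last _ (by simp)]

-- loop invariant tying A's running state to B's boundary list
lemma pv_inv (l : List Char) (n : Int) (m : Int) (h1 : 1 ≤ m) (hm : m ≤ n) :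
    ∃ Bnd c,
      (PySem.List.pyRange 1 m 1).foldl (pvStepB l) ([], PySem.List.pyGetD l 0 ' ') = (Bnd, c) ∧
      (PySem.List.pyRange 1 m 1).foldl (pvStepA l n) (0, PySem.List.pyGetD l 0 ' ', 1) =
        (pvGmax Bnd, c, m - Bnd.getLastD 0) ∧
      Bnd.getLastD 0 ≤ m - 1 ∧ (∀ b ∈ Bnd, 1 ≤ b) := by
  induction m, h1 using Int.le_induction with
  | base =>
      refine ⟨[], PySem.List.pyGetD l 0 ' ', ?_, ?_, by norm_num, by simp⟩
      · simp [PySem.List.pyRange_one_eq_nil (by omega : (1:Int) ≤ 1)]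
      · simp [PySem.List.pyRange_one_eq_nil (by omega : (1:Int) ≤ 1), pvGmax]
  | succ m h1 ih =>
      obtain ⟨Bnd, c, hB, hA, hlast, hpos⟩ := ih (by omega)
      rw [PySem.List.pyRange_one_succ_right (show (1:Int) ≤ m by omega), List.foldl_append, hB,
          List.foldl_append, hA]
      simp only [List.foldl_cons, List.foldl_nil]
      by_cases hc : PySem.List.pyGetD l m ' ' = c
      · refine ⟨Bnd, c, ?_, ?_, by omega, hpos⟩
        · simp [pvStepB, hc]
        · simp [pvStepA, hc]
          omega
      · refine ⟨Bnd ++ [m], PySem.List.pyGetD l m ' ', ?_, ?_, by simp, ?_⟩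
        · simp [pvStepB, hc]
        · cases Bnd with
          | nil =>
              -- first run ends: start = m - count = 0, A records nothing
              have hm0 : m - (m - ([] : List Int).getLastD 0) = 0 := by simp
              simp only [pvStepA, hc]
              have : ¬(m - (m - ([] : List Int).getLastD 0) > 0 ∧ m - 1 < n - 1) := by
                simp
              simp [pvGmax]
          | cons r t =>
              have hr1 : 1 ≤ (r :: t).getLastD 0 := by
                have hmem : (r :: t).getLastD 0 ∈ (r :: t) := by
                  rw [List.getLastD_eq_getLast?, List.getLast?_eq_some_getLast (by simp)]
                  exact List.getLast_mem _
                exact hpos _ hmem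
              have hcond : m - (m - (r :: t).getLastD 0) > 0 ∧ m - 1 < n - 1 :=
                ⟨by omega, by omega⟩
              rw [pvGmax_append _ (by simp) m]
              simp [pvStepA, hc, hcond]
              have hl : ((r :: t) ++ [m]).getLast?.getD 0 = m := by
                rw [List.getLast?_concat]; rfl
              have he : (r :: t).getLast?.getD 0 = (r :: t).getLastD 0 := by
                rw [List.getLastD_eq_getLast?]
              rw [show r :: (t ++ [m]) = (r :: t) ++ [m] from rfl, hl]
              exact ⟨fun h => by omega, by omega⟩
        · intro b hb
          rcases List.mem_append.mp hb with h | h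
          · exact hpos b h
          · simp at h; omega

-- ===== VERDICT (by name: the statement is the Claim_ definition above) =====
theorem find_significant_pattern_length_spec : Claim_equal_find_significant_pattern_length := by
  intro n s _ _
  unfold Spec_find_significant_pattern_length
  unfold find_significant_pattern_length find_significant_pattern_length_alt
  by_cases hn : 1 ≤ n
  · obtain ⟨Bnd, c, hB, hA, hlast, hpos⟩ := pv_inv s.toList n n hn (le_refl n)
    rw [hB, hA]
    simp only []
    rw [pv_loopB]
    simp
  · rw [PySem.List.pyRange_one_eq_nil (by omega : n ≤ 1)]
    simp only [List.foldl_nil]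
    have hA : ¬(n - 1 > 0 ∧ n - 1 < n - 1) := by omega
    rw [if_neg hA]
    simp
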